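-- pv_equiv track=rewrite | github.com/DDohyeon2941/A-measure-of-the-importance-of-moment-for-ball-strike-counts-in-a-baseball-plate-appearance | draft/data_processing_wrt_speed.py | prep_foul
-- ===== SOURCE A (Python) =====
-- def prep_foul(whole_str):
--     """string 형태"""
--     temp_str = whole_str[:-1]
--
--     s_count= 0
--     bin_code = ''
--
--     if temp_str.count('S') <= 2:
--         bin_code = temp_str
--     else:
--         for uni_code in temp_str:
--             if uni_code == 'S':
--                 if  s_count < 2:
--                     bin_code += uni_code
--                     s_count+=1
--             else:
--                 bin_code += uni_code
--     return bin_code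
-- ===== SOURCE B (Python) =====
-- def prep_foul(whole_str):
--     """string 형태"""
--     parts = whole_str[:-1].split('S')
--     return 'S'.join(parts[:3]) + ''.join(parts[3:])
-- ===== Notes on version B (the rewrite author's own statement) =====
-- stated objective: idiomatic
-- what changed: Replaces the character-by-character scan with a running strike counter by splitting the trimmed string on the strike character and rejoining only the first two separators (join of the first three segments plus plain concatenation of the rest); no explicit loop or counter remains.
import Mathlib
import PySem

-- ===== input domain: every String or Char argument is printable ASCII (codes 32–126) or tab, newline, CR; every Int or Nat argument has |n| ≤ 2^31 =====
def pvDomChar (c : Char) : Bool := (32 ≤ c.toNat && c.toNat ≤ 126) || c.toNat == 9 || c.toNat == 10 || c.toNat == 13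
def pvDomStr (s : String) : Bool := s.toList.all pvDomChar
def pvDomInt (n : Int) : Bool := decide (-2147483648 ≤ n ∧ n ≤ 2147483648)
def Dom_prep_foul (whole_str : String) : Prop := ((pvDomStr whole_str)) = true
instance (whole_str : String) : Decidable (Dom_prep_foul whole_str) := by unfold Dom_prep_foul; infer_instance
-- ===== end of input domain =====

-- B drops the last char, splits on the strike character and rejoins only the first two separators, instead of A's character scan with a strike counter (objective: idiomatic; same cost).

-- ===== PORT A =====
def prep_foul (whole_str : String) : String :=
  let temp_str := PySem.Chars.slice whole_str.toList none (some (-1))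
  if PySem.Chars.count temp_str ['S'] ≤ 2 then
    String.ofList temp_str
  else
    String.ofList ((temp_str.foldl
      (fun (st : List Char × Int) uni_code =>
        if uni_code = 'S' then
          if st.2 < 2 then (st.1 ++ [uni_code], st.2 + 1) else st
        else
          (st.1 ++ [uni_code], st.2))
      ([], 0)).1)

-- ===== PORT B =====
def prep_foul_alt (whole_str : String) : String :=
  let parts := PySem.Chars.splitOn (PySem.Chars.slice whole_str.toList none (some (-1))) ['S']
  String.ofList (PySem.Chars.join ['S'] (parts.take 3) ++ PySem.Chars.join [] (parts.drop 3))

-- ===== PRECONDITION & SPEC =====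
def Spec_prep_foul (whole_str : String) (out : String) : Prop := out = prep_foul_alt whole_str
instance (whole_str : String) (out : String) : Decidable (Spec_prep_foul whole_str out) := by unfold Spec_prep_foul; infer_instance

-- ===== CLAIM (what is proved, stated in full; the proofs are below) =====
def Claim_equal_prep_foul : Prop := ∀ (whole_str : String), Dom_prep_foul whole_str → Spec_prep_foul whole_str (prep_foul whole_str)

-- ===== LEMMAS AND PROOFS =====

/-- prepend `pre` to the first segment (helper to characterise `splitOn`). -/
def consPre (pre : List Char) : List (List Char) → List (List Char)
  | [] => [pre]
  | p :: ps => (pre ++ p) :: ps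

/-- structural single-char split on 'S'. -/
def split1 : List Char → List (List Char)
  | [] => [[]]
  | c :: t => if c = 'S' then [] :: split1 t else consPre [c] (split1 t)

/-- shared semantics of both programs: keep every non-'S' char and the first `2 - n` strikes. -/
def keepA : List Char → Int → List Char × Int
  | [], n => ([], n)
  | c :: t, n =>
    if c = 'S' then
      if n < 2 then ('S' :: (keepA t (n + 1)).1, (keepA t (n + 1)).2)
      else keepA t n
    else (c :: (keepA t n).1, (keepA t n).2)

theorem split1_ne_nil (t : List Char) : split1 t ≠ [] := by
  cases t with
  | nil => simp [split1]
  | cons c t =>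
    simp only [split1]
    split_ifs
    · simp
    · cases h : split1 t <;> simp [consPre]

theorem split1_cons_exists (t : List Char) : ∃ p ps, split1 t = p :: ps := by
  cases h : split1 t with
  | nil => exact absurd h (split1_ne_nil t)
  | cons p ps => exact ⟨p, ps, rfl⟩

theorem consPre_append (x : List Char) (c : Char) (P : List (List Char)) :
    consPre (x ++ [c]) P = consPre x (consPre [c] P) := by
  cases P <;> simp [consPre]

theorem split1_S (t : List Char) : split1 ('S' :: t) = [] :: split1 t := by
  simp [split1]

theorem split1_ne (c : Char) (t : List Char) (hc : c ≠ 'S') :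
    split1 (c :: t) = consPre [c] (split1 t) := by
  simp [split1, hc]

theorem keepA_S (t : List Char) (n : Int) :
    keepA ('S' :: t) n
      = if n < 2 then ('S' :: (keepA t (n + 1)).1, (keepA t (n + 1)).2) else keepA t n := by
  simp [keepA]

theorem keepA_ne (c : Char) (t : List Char) (n : Int) (hc : c ≠ 'S') :
    keepA (c :: t) n = (c :: (keepA t n).1, (keepA t n).2) := by
  simp [keepA, hc]

theorem go_split1 (fuel : Nat) : ∀ (l cur : List Char) (accs : List (List Char)),
    l.length < fuel →
    PySem.Chars.splitOn.go ['S'] fuel l cur accs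
      = accs.reverse ++ consPre cur.reverse (split1 l) := by
  induction fuel with
  | zero => intro l cur accs h; exact absurd h (by omega)
  | succ fuel ih =>
    intro l cur accs h
    cases l with
    | nil =>
      rw [PySem.Chars.splitOn.go.eq_def]
      simp [split1, consPre]
    | cons c rest =>
      rw [PySem.Chars.splitOn.go.eq_def]
      by_cases hc : c = 'S'
      · subst hc
        simp only [List.isPrefixOf, BEq.rfl, Bool.true_and,
          if_true, List.length_singleton, List.drop_succ_cons, List.drop_zero]
        rw [ih rest [] (cur.reverse :: accs) (by simpa using Nat.lt_of_succ_lt_succ h)]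
        obtain ⟨p, ps, hps⟩ := split1_cons_exists rest
        simp [split1, hps, consPre]
      · have hb : (('S' == c) : Bool) = false := by
          simp; exact fun h' => hc h'.symm
        simp only [List.isPrefixOf, hb, Bool.false_and, if_false, Bool.false_eq_true]
        rw [ih rest (c :: cur) accs (by simpa using Nat.lt_of_succ_lt_succ h)]
        simp only [List.reverse_cons, consPre_append]
        simp [split1, hc]

theorem splitOn_eq_split1 (l : List Char) :
    PySem.Chars.splitOn l ['S'] = split1 l := by
  have h0 : PySem.Chars.splitOn l ['S'] = PySem.Chars.splitOn.go ['S'] (l.length + 1) l [] [] := rfl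
  rw [h0, go_split1 (l.length + 1) l [] [] (by omega)]
  obtain ⟨p, ps, hps⟩ := split1_cons_exists l
  simp [hps, consPre]

theorem countgo_S (fuel : Nat) : ∀ (l : List Char) (acc : Nat), l.length ≤ fuel →
    PySem.Chars.count.go ['S'] fuel l acc = acc + l.count 'S' := by
  induction fuel with
  | zero =>
    intro l acc h
    rw [PySem.Chars.count.go.eq_def]
    cases l with
    | nil => simp
    | cons c rest => simp at h
  | succ fuel ih =>
    intro l acc h
    cases l with
    | nil => rw [PySem.Chars.count.go.eq_def]; simp
    | cons c rest =>
      rw [PySem.Chars.count.go.eq_def]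
      by_cases hc : c = 'S'
      · subst hc
        simp only [List.isPrefixOf, BEq.rfl, Bool.true_and,
          if_true, List.length_singleton, List.drop_succ_cons, List.drop_zero]
        rw [ih rest (acc + 1) (by simpa using Nat.le_of_succ_le_succ h)]
        simp
        omega
      · have hb : (('S' == c) : Bool) = false := by
          simp; exact fun h' => hc h'.symm
        simp only [List.isPrefixOf, hb, Bool.false_and, if_false, Bool.false_eq_true]
        rw [ih rest acc (by simpa using Nat.le_of_succ_le_succ h)]
        simp [hc]

theorem count_S (l : List Char) : PySem.Chars.count l ['S'] = l.count 'S' := by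
  have h0 : PySem.Chars.count l ['S'] = PySem.Chars.count.go ['S'] l.length l 0 := rfl
  rw [h0]
  simpa using countgo_S l.length l 0 (le_refl _)

theorem foldl_keepA (t : List Char) : ∀ (b : List Char) (n : Int),
    t.foldl
      (fun (st : List Char × Int) uni_code =>
        if uni_code = 'S' then
          if st.2 < 2 then (st.1 ++ [uni_code], st.2 + 1) else st
        else
          (st.1 ++ [uni_code], st.2)) (b, n)
      = (b ++ (keepA t n).1, (keepA t n).2) := by
  induction t with
  | nil => intro b n; simp [keepA]
  | cons c t ih =>
    intro b n
    by_cases hc : c = 'S'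
    · subst hc
      by_cases hn : n < 2
      · simp only [List.foldl_cons, if_pos hn]
        rw [ih]
        simp [keepA, hn]
      · simp only [List.foldl_cons, if_neg hn]
        rw [ih]
        simp [keepA, hn]
    · simp only [List.foldl_cons, if_neg hc]
      rw [ih]
      simp [keepA, hc]

theorem join_cons_head (sep : List Char) (c : Char) (p : List Char) (X : List (List Char)) :
    PySem.Chars.join sep ((c :: p) :: X) = c :: PySem.Chars.join sep (p :: X) := by
  cases X with
  | nil => simp [PySem.Chars.join_singleton]
  | cons q qs => simp [PySem.Chars.join_cons_cons]

theorem sjoin_cons_nil_head (X : List (List Char)) (hX : X ≠ []) :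
    PySem.Chars.join ['S'] ([] :: X) = 'S' :: PySem.Chars.join ['S'] X := by
  cases X with
  | nil => exact absurd rfl hX
  | cons q qs => simp [PySem.Chars.join_cons_cons]

theorem flat_head (p : List Char) (ps : List (List Char)) :
    PySem.Chars.join [] (p :: ps) = p ++ PySem.Chars.join [] ps := by
  cases ps with
  | nil => simp [PySem.Chars.join_singleton, PySem.Chars.join_nil]
  | cons q qs => simp [PySem.Chars.join_cons_cons]

theorem join_split_keepA (t : List Char) : ∀ (n : Int), 0 ≤ n → n ≤ 2 →
    PySem.Chars.join ['S'] ((split1 t).take (3 - n).toNat) ++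
      PySem.Chars.join [] ((split1 t).drop (3 - n).toNat) = (keepA t n).1 := by
  induction t with
  | nil =>
    intro n h0 h2
    obtain ⟨k, hk⟩ : ∃ k, (3 - n).toNat = k + 1 := ⟨(3 - n).toNat - 1, by omega⟩
    rw [hk]
    simp [split1, keepA, PySem.Chars.join_singleton, PySem.Chars.join_nil]
  | cons c t ih =>
    intro n h0 h2
    obtain ⟨p, ps, hps⟩ := split1_cons_exists t
    by_cases hc : c = 'S'
    · subst hc
      rw [split1_S, keepA_S]
      by_cases hn : n < 2
      · rw [if_pos hn]
        obtain ⟨k, hk⟩ : ∃ k, (3 - (n + 1)).toNat = k + 1 := ⟨(3 - (n + 1)).toNat - 1, by omega⟩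
        have h3 : (3 - n).toNat = (k + 1) + 1 := by omega
        rw [h3, List.take_succ_cons, List.drop_succ_cons]
        rw [sjoin_cons_nil_head _ (by rw [hps]; simp)]
        have ihh := ih (n + 1) (by omega) (by omega)
        rw [hk] at ihh
        rw [List.cons_append, ihh]
      · rw [if_neg hn]
        have hn2 : n = 2 := by omega
        subst hn2
        have h1 : ((3 : Int) - 2).toNat = 0 + 1 := by norm_num
        rw [h1, List.take_succ_cons, List.take_zero, List.drop_succ_cons, List.drop_zero]
        have ihh := ih 2 (by norm_num) (le_refl 2)
        rw [h1, hps, List.take_succ_cons, List.take_zero, List.drop_succ_cons,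
          List.drop_zero, PySem.Chars.join_singleton] at ihh
        rw [hps, PySem.Chars.join_singleton, flat_head, List.nil_append, ihh]
    · rw [split1_ne c t hc, keepA_ne c t n hc, hps]
      have hcp : consPre [c] (p :: ps) = (c :: p) :: ps := by simp [consPre]
      obtain ⟨k, hk⟩ : ∃ k, (3 - n).toNat = k + 1 := ⟨(3 - n).toNat - 1, by omega⟩
      rw [hcp, hk, List.take_succ_cons, List.drop_succ_cons, join_cons_head]
      have ihh := ih n h0 h2
      rw [hk, hps, List.take_succ_cons, List.drop_succ_cons] at ihh
      rw [List.cons_append, ihh]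

theorem keepA_id (t : List Char) : ∀ (n : Int), (t.count 'S' : Int) ≤ 2 - n → (keepA t n).1 = t := by
  induction t with
  | nil => intro n _; simp [keepA]
  | cons c t ih =>
    intro n h
    by_cases hc : c = 'S'
    · subst hc
      have hcnt : (t.count 'S' : Int) + 1 ≤ 2 - n := by
        have he : ('S' :: t).count 'S' = t.count 'S' + 1 := by simp
        rw [he] at h
        push_cast at h
        omega
      have hn : n < 2 := by
        have hnn : (0 : Int) ≤ (t.count 'S' : Int) := Int.natCast_nonneg _
        omega
      rw [keepA_S, if_pos hn]
      show 'S' :: (keepA t (n + 1)).1 = 'S' :: t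
      rw [ih (n + 1) (by omega)]
    · have hcc : (c :: t).count 'S' = t.count 'S' := by simp [hc]
      rw [hcc] at h
      rw [keepA_ne c t n hc]
      show c :: (keepA t n).1 = c :: t
      rw [ih n h]

-- ===== VERDICT (by name: the statement is the Claim_ definition above) =====
theorem prep_foul_spec : Claim_equal_prep_foul := by
  intro w _
  unfold Spec_prep_foul prep_foul prep_foul_alt
  simp only [splitOn_eq_split1, count_S]
  have hB : PySem.Chars.join ['S'] ((split1 (PySem.Chars.slice w.toList none (some (-1)))).take 3) ++
      PySem.Chars.join [] ((split1 (PySem.Chars.slice w.toList none (some (-1)))).drop 3)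
      = (keepA (PySem.Chars.slice w.toList none (some (-1))) 0).1 := by
    have h := join_split_keepA (PySem.Chars.slice w.toList none (some (-1))) 0 (by norm_num) (by norm_num)
    norm_num at h
    exact h
  split_ifs with h
  · have hid : (keepA (PySem.Chars.slice w.toList none (some (-1))) 0).1
        = PySem.Chars.slice w.toList none (some (-1)) :=
      keepA_id _ 0 (by omega)
    rw [hB, hid]
  · rw [foldl_keepA, List.nil_append, hB]
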